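-- pv_equiv track=rewrite | github.com/nhneptune/Fixed-Length-Error-Correcting-Codes | flecc_with_sat.py | _compute_lee_weight_multiplicities
-- ===== SOURCE A (Python) =====
-- def _compute_lee_weight_multiplicities(alphabet_size):
--     """Count how many q-ary symbols have each possible Lee weight."""
--     q = alphabet_size
--     max_weight = q // 2
--     multiplicities = {0: 1}
--
--     for weight in range(1, max_weight + 1):
--         if q % 2 == 0 and weight == q // 2:
--             multiplicities[weight] = 1
--         else:
--             multiplicities[weight] = 2
--
--     return multiplicities
-- ===== SOURCE B (Python) =====
-- def _compute_lee_weight_multiplicities(alphabet_size):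
--     """Count how many q-ary symbols have each possible Lee weight."""
--     q = alphabet_size
--     multiplicities = {0: 1}
--     for a in range(1, q):
--         w = min(a, q - a)
--         multiplicities[w] = multiplicities.get(w, 0) + 1
--     return multiplicities
-- ===== Notes on version B (the rewrite author's own statement) =====
-- stated objective: alternative
-- what changed: B enumerates the q-1 nonzero symbols and tallies each symbol's Lee weight min(a, q-a) into the dict, instead of A's per-weight loop that case-splits on whether the weight is the self-paired midpoint of an even alphabet.
import Mathlib
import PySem

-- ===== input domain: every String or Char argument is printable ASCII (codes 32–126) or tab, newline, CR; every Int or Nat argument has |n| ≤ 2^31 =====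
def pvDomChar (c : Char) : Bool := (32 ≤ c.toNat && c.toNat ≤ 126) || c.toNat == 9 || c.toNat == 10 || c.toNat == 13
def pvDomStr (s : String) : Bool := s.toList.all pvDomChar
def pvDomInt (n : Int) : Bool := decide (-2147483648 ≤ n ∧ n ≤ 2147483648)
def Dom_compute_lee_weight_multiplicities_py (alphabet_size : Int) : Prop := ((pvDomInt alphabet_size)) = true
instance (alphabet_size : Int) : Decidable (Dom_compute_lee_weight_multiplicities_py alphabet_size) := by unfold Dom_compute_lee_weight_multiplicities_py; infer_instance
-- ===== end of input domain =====

-- B tallies the Lee weight min(a, q-a) of each nonzero symbol a into the dict,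
-- instead of A's per-weight loop with a case split on the even-q midpoint (objective: alternative).

-- ===== PORT A =====
def compute_lee_weight_multiplicities_py (alphabet_size : Int) : List (Int × Int) :=
  let q := alphabet_size
  let max_weight := PySem.Int.floordiv q 2
  let init : PySem.Dict Int Int := PySem.Dict.mk [(0, 1)]
  ((PySem.List.pyRange 1 (max_weight + 1)).foldl
    (fun d weight =>
      if PySem.Int.mod q 2 = 0 ∧ weight = PySem.Int.floordiv q 2
      then d.insert weight 1
      else d.insert weight 2)
    init).items

-- ===== PORT B =====
def compute_lee_weight_multiplicities_py_alt (alphabet_size : Int) : List (Int × Int) :=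
  let q := alphabet_size
  let init : PySem.Dict Int Int := PySem.Dict.mk [(0, 1)]
  ((PySem.List.pyRange 1 q).foldl
    (fun d a =>
      let w := min a (q - a)
      d.insert w (d.getD w 0 + 1))
    init).items

-- ===== PRECONDITION & SPEC =====
def Spec_compute_lee_weight_multiplicities_py (alphabet_size : Int) (out : List (Int × Int)) : Prop := out = compute_lee_weight_multiplicities_py_alt alphabet_size
instance (alphabet_size : Int) (out : List (Int × Int)) : Decidable (Spec_compute_lee_weight_multiplicities_py alphabet_size out) := by unfold Spec_compute_lee_weight_multiplicities_py; infer_instance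

-- ===== CLAIM (what is proved, stated in full; the proofs are below) =====
def Claim_equal_compute_lee_weight_multiplicities_py : Prop := ∀ (alphabet_size : Int), Dom_compute_lee_weight_multiplicities_py alphabet_size → Spec_compute_lee_weight_multiplicities_py alphabet_size (compute_lee_weight_multiplicities_py alphabet_size)

-- ===== LEMMAS AND PROOFS =====

-- updating a set with elements it already has leaves it unchanged
theorem pv_set_update_mem (l : List Int) : ∀ (s : PySem.Set Int),
    (∀ x ∈ l, x ∈ s) → PySem.Set.update s l = s := by
  induction l with
  | nil => intro s _; rfl
  | cons x t ih =>
      intro s h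
      have hx : PySem.Set.add s x = s := by
        simp [PySem.Set.add, PySem.Set.contains, h x (by simp)]
      show PySem.Set.update (PySem.Set.add s x) t = s
      rw [hx]
      exact ih s (fun y hy => h y (by simp [hy]))

-- updating a set with fresh distinct elements appends them
theorem pv_set_update_fresh (l : List Int) : ∀ (s : PySem.Set Int),
    l.Nodup → (∀ x ∈ l, x ∉ s) → PySem.Set.update s l = s ++ l := by
  induction l with
  | nil => intro s _ _; simp [PySem.Set.update]
  | cons x t ih =>
      intro s hnd h
      have hx : PySem.Set.add s x = s ++ [x] := by
        simp [PySem.Set.add, PySem.Set.contains, h x (by simp)]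
      show PySem.Set.update (PySem.Set.add s x) t = s ++ x :: t
      rw [hx, ih (s ++ [x]) hnd.of_cons]
      · simp
      · intro y hy
        simp only [List.mem_append, List.mem_singleton]
        rintro (hs | rfl)
        · exact h y (by simp [hy]) hs
        · exact (List.nodup_cons.mp hnd).1 hy

-- Set.update over an append is two updates
theorem pv_set_update_append (l1 l2 : List Int) (s : PySem.Set Int) :
    PySem.Set.update s (l1 ++ l2) = PySem.Set.update (PySem.Set.update s l1) l2 := by
  simp [PySem.Set.update, List.foldl_append]

-- the list of Lee weights of the nonzero symbols, in symbol order
def pvW (q : Int) : List Int := (PySem.List.pyRange 1 q).map (fun a => min a (q - a))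

theorem pvW_split (q : Int) (h : 2 ≤ q) :
    pvW q = PySem.List.pyRange 1 (q / 2 + 1) ++
      (PySem.List.pyRange (q / 2 + 1) q).map (fun a => q - a) := by
  have h1 : (1 : Int) ≤ q / 2 + 1 := by omega
  have h2 : q / 2 + 1 ≤ q := by omega
  rw [pvW, PySem.List.pyRange_one_append 1 (q / 2 + 1) q h1 h2, List.map_append]
  congr 1
  · conv_rhs => rw [← List.map_id (PySem.List.pyRange 1 (q / 2 + 1))]
    apply List.map_congr_left
    intro a ha
    rw [PySem.List.mem_pyRange_one] at ha
    simp only [id_eq]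
    exact min_eq_left (by omega)
  · apply List.map_congr_left
    intro a ha
    rw [PySem.List.mem_pyRange_one] at ha
    exact min_eq_right (by omega)

theorem pvW_count (q v : Int) (h : 2 ≤ q) :
    (pvW q).count v =
      (if 1 ≤ v ∧ v ≤ q / 2 then 1 else 0) + (if 1 ≤ v ∧ v ≤ q - q / 2 - 1 then 1 else 0) := by
  rw [pvW_split q h, List.count_append]
  congr 1
  · by_cases hv : 1 ≤ v ∧ v ≤ q / 2
    · rw [if_pos hv]
      exact List.count_eq_one_of_mem (PySem.List.nodup_pyRange_one _ _)
        (PySem.List.mem_pyRange_one.mpr (by omega))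
    · rw [if_neg hv]
      exact List.count_eq_zero_of_not_mem
        (fun hmem => hv (by have := PySem.List.mem_pyRange_one.mp hmem; omega))
  · have hinj : Function.Injective (fun a : Int => q - a) := by
      intro x y hxy; simpa using hxy
    have hcm := List.count_map_of_injective (PySem.List.pyRange (q / 2 + 1) q)
      (fun a : Int => q - a) hinj (q - v)
    simp only at hcm
    rw [show q - (q - v) = v from by ring] at hcm
    rw [hcm]
    by_cases hv : 1 ≤ v ∧ v ≤ q - q / 2 - 1
    · rw [if_pos hv]
      exact List.count_eq_one_of_mem (PySem.List.nodup_pyRange_one _ _)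
        (PySem.List.mem_pyRange_one.mpr (by omega))
    · rw [if_neg hv]
      exact List.count_eq_zero_of_not_mem
        (fun hmem => hv (by have := PySem.List.mem_pyRange_one.mp hmem; omega))

-- the initial dict {0: 1}
theorem pv_init_getD (v : Int) :
    (PySem.Dict.mk [((0 : Int), (1 : Int))]).getD v 0 = if v = 0 then 1 else 0 := by
  rcases eq_or_ne v 0 with rfl | hv
  · simp [PySem.Dict.getD_eq_get?_getD, PySem.Dict.get?_mk_cons]
  · simp [PySem.Dict.getD_eq_get?_getD, hv, Ne.symm hv, PySem.Dict.get?]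

theorem pv_main (q : Int) :
    compute_lee_weight_multiplicities_py q = compute_lee_weight_multiplicities_py_alt q := by
  unfold compute_lee_weight_multiplicities_py compute_lee_weight_multiplicities_py_alt
  simp only
  rw [PySem.Int.floordiv_eq_ediv_of_pos (by norm_num : (0:Int) < 2)]
  -- rewrite B's fold over symbols into a fold over the weight list pvW q
  rw [show (PySem.List.pyRange 1 q).foldl
        (fun (d : PySem.Dict Int Int) a =>
          let w := min a (q - a); d.insert w (d.getD w 0 + 1))
        (PySem.Dict.mk [(0, 1)]) =
      (pvW q).foldl (fun d w => d.insert w (d.getD w 0 + 1)) (PySem.Dict.mk [(0, 1)]) from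
    (List.foldl_map (f := fun a : Int => min a (q - a))
      (g := fun (d : PySem.Dict Int Int) w => d.insert w (d.getD w 0 + 1))
      (l := PySem.List.pyRange 1 q) (init := PySem.Dict.mk [(0, 1)])).symm]
  by_cases hq : q ≤ 1
  · -- both loops are empty
    have hA : PySem.List.pyRange 1 (q / 2 + 1) = [] :=
      PySem.List.pyRange_one_eq_nil (by omega)
    have hB : pvW q = [] := by
      rw [pvW, PySem.List.pyRange_one_eq_nil (by omega)]; rfl
    rw [hA, hB]
    rfl
  · have hq2 : 2 ≤ q := by omega
    -- A's side: a loop over fresh distinct keys appends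
    have hAfun : ∀ (d : PySem.Dict Int Int), ∀ w ∈ PySem.List.pyRange 1 (q / 2 + 1),
        (if PySem.Int.mod q 2 = 0 ∧ w = q / 2 then d.insert w 1 else d.insert w 2) =
        d.insert w (if PySem.Int.mod q 2 = 0 ∧ w = q / 2 then 1 else 2) := by
      intro d w _
      split_ifs <;> rfl
    rw [PySem.List.foldl_congr_mem _ _ _ _ hAfun]
    rw [PySem.Dict.items_foldl_insert_fresh _ (fun w => w)
        (fun w => if PySem.Int.mod q 2 = 0 ∧ w = q / 2 then (1 : Int) else 2) _
        (by
          intro a ha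
          have := PySem.List.mem_pyRange_one.mp ha
          simp [PySem.Dict.contains]
          omega)
        (by simpa using PySem.List.nodup_pyRange_one 1 (q / 2 + 1))]
    -- B's side: keys and values of the counting fold
    have hkeys : ((pvW q).foldl
        (fun (d : PySem.Dict Int Int) w => d.insert w (d.getD w 0 + 1))
        (PySem.Dict.mk [(0, 1)])).keys = 0 :: PySem.List.pyRange 1 (q / 2 + 1) := by
      rw [PySem.Dict.keys_foldl_insert (f := fun d w => d.getD w 0 + 1)]
      have hk0 : (PySem.Dict.mk [((0:Int), (1:Int))]).keys = [(0 : Int)] := rfl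
      rw [hk0, pvW_split q hq2, pv_set_update_append,
        pv_set_update_fresh _ _ (PySem.List.nodup_pyRange_one _ _)
          (by
            intro x hx
            have := PySem.List.mem_pyRange_one.mp hx
            simp only [List.mem_singleton]
            omega),
        pv_set_update_mem]
      · rfl
      · intro x hx
        rcases List.mem_map.mp hx with ⟨a, ha, rfl⟩
        have := PySem.List.mem_pyRange_one.mp ha
        simp only [List.cons_append, List.nil_append, List.mem_cons]
        right
        exact PySem.List.mem_pyRange_one.mpr (by omega)
    have hnodup : ((pvW q).foldl
        (fun (d : PySem.Dict Int Int) w => d.insert w (d.getD w 0 + 1))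
        (PySem.Dict.mk [(0, 1)])).keys.Nodup := by
      apply PySem.Dict.nodup_keys_foldl_insert
      simp [PySem.Dict.keys]
    rw [PySem.Dict.items_eq_map_keys _ hnodup 0, hkeys]
    -- compare element by element
    have hgetD : ∀ v : Int, ((pvW q).foldl
        (fun (d : PySem.Dict Int Int) w => d.insert w (d.getD w 0 + 1))
        (PySem.Dict.mk [(0, 1)])).getD v 0 =
        (if v = 0 then 1 else 0) + ((pvW q).count v : Int) := by
      intro v
      rw [PySem.Dict.getD_foldl_insert_add_one, pv_init_getD]
    have hc0 : (pvW q).count 0 = 0 := by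
      rw [pvW_count q 0 hq2]; norm_num
    have hitems : PySem.Dict.items (PySem.Dict.mk [((0:Int), (1:Int))]) = [(0, 1)] := rfl
    have hmod : PySem.Int.mod q 2 = q % 2 :=
      PySem.Int.mod_eq_emod_of_pos (by norm_num)
    rw [hitems, List.map_cons, hgetD 0]
    simp only [List.cons_append, List.nil_append, List.cons.injEq]
    refine ⟨by rw [hc0]; norm_num, ?_⟩
    apply List.map_congr_left
    intro w hw
    have hwmem := PySem.List.mem_pyRange_one.mp hw
    simp only [Prod.mk.injEq, hgetD, true_and]
    have hw0 : ¬ (w = 0) := by omega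
    rw [hmod, if_neg hw0, pvW_count q w hq2]
    split_ifs <;> push_cast <;> omega

-- ===== VERDICT (by name: the statement is the Claim_ definition above) =====
theorem compute_lee_weight_multiplicities_py_spec : Claim_equal_compute_lee_weight_multiplicities_py := by
  intro q _
  unfold Spec_compute_lee_weight_multiplicities_py
  exact pv_main q
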